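/- GENERATED by mk_final_copies.py from the proof of the farm's unit `compute_bitreverse` (farm:compute_bitreverse.1: Lemmas.lean) as the
   re-elaboration sweep compiled it — do not edit. -/
/-
  The pure facts of the unit `compute_bitreverse` (stb_vorbis_fixed.c 1305-1311): SH7 for `log2_4` over the pushes, the value of
  `ilog(n)` for a block size, and the walker's bit-level terms of `lea r13d, [rax - 1]`, `sar r12d, 3`, `cmp ebp, r12d`,
  `add ebp, 1`, `lea r15, [r14 + rdx * 2]`, `shr eax, cl ; lea ebx, [rax * 4] ; mov [r15], bx` as numbers. No machine state.
-/
import Asan.CheckWalk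
import Vorbis.Spec.Units.compute_bitreverse

open X86 X86.User Asan Vorbis

namespace Vorbis.Spec.compute_bitreverse


/-- SH7 for `log2_4` is kept by any memory change that leaves the sixteen bytes of the table alone (here: the pushes
of `compute_bitreverse` before the call of `ilog` at 0x1048f4). -/
theorem log2_4In_eqOn {mem mem' : Mem} (h : Spec.Log2_4In mem) (he : Mem.EqOn 0x120640 0x120650 mem mem') :
    Spec.Log2_4In mem' := by
  intro i hi
  have hlt : Vorbis.Globals.log2_4.beg + i < 2 ^ 64 := by
    simp only [Vorbis.Globals.log2_4]
    omega
  have ea : (UInt64.ofNat (Vorbis.Globals.log2_4.beg + i)).toNat = 0x120640 + i := by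
    rw [UInt64.toNat_ofNat', Nat.mod_eq_of_lt hlt]
    rfl
  rw [he.readLE _ 1 (by omega) (by omega) (by omega)]
  exact h i hi

/-- The value of `ilog(n)` for a block size `n = 2 ^ k` (0x1048f4, C line 1307): `k + 1`, from the contract's form
of the argument (the signed value of `edi`). -/
theorem ilogVal_ld {n k : Nat} (x : Word) (hx : x.toNat % 2 ^ 32 = n) (hk : Mdct.Ld n k) :
    Spec.ilogVal (Word.part .w32 x).toInt = k + 1 := by
  have hlt : k < 31 := by
    have := hk.le
    omega
  have hn : n < 2 ^ 31 := by
    have := hk.cases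
    omega
  rw [Spec.part32_toInt, hx]
  have e : sint32 n = ((2 : Int) ^ k) := by
    unfold sint32
    rw [if_pos hn, hk.eq]
    exact Int.natCast_pow 2 k
  rw [e]
  exact Spec.ilogVal_two_pow k hlt


/-- `lea r13d, [rax - 1]` (0x1048f9, C line 1307 `ld = ilog(n) - 1`): with `rax = k + 1` the walker's term is `k`. -/
theorem lea_sub1 (z : Word) (k : Nat) (hz : z.toNat = k + 1) :
    BitVec.setWidth 32 (z - 1).toBitVec = BitVec.ofNat 32 k := by
  apply BitVec.eq_of_toNat_eq
  have e1 : (1 : Word).toNat = 1 := rfl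
  have hlt := z.toNat_lt
  rw [BitVec.toNat_setWidth, UInt64.toNat_toBitVec, BitVec.toNat_ofNat, UInt64.toNat_sub, e1, hz]
  omega

/-- `sar r12d, 3` (0x1048fd, C line 1308 `n8 = n >> 3`) of a non-negative `int`: the walker's term is `n / 8`. -/
theorem sar3 (x : Word) (n : Nat) (hx : x.toNat % 2 ^ 32 = n) (hn : n < 2 ^ 31) :
    (Word.part .w32 x).sshiftRight 3 = BitVec.ofNat 32 (n / 8) := by
  apply BitVec.eq_of_toNat_eq
  have hm : (Word.part .w32 x).msb = false := by
    rw [BitVec.msb_eq_decide, Asan.part32_toNat]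
    simp only [Width.bits, decide_eq_false_iff_not, Nat.not_le]
    omega
  rw [BitVec.toNat_sshiftRight_of_msb_false hm, Asan.part32_toNat, Nat.shiftRight_eq_div_pow, BitVec.toNat_ofNat, hx]
  simp only [Width.bits]
  omega

/-- A small number as a signed 32-bit value (the operands of `cmp ebp, r12d ; jl` at 0x104936) is the number. -/
theorem toInt_small (a : Nat) (h : a < 2 ^ 31) : (BitVec.ofNat 32 a).toInt = (a : Int) := by
  rw [toInt_ofNat32 a (by omega)]
  unfold sint32
  rw [if_pos h]

/-- A small number zero-extended into a register, as a number (the measure of the loop: `ebp`). -/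
theorem toNat_reg32 (a : Nat) (h : a < 2 ^ 32) : (Word.ofBV (BitVec.ofNat 32 a)).toNat = a := by
  rw [Vorbis.toNat_ofBV32, BitVec.toNat_ofNat]
  exact Nat.mod_eq_of_lt h

/-- `add ebp, 1` (0x104933, C line 1309 `++i`). -/
theorem ebp_inc (i : Nat) : BitVec.ofNat 32 i + 1#32 = BitVec.ofNat 32 (i + 1) := by
  apply BitVec.eq_of_toNat_eq
  rw [BitVec.toNat_add, BitVec.toNat_ofNat, BitVec.toNat_ofNat, BitVec.toNat_ofNat]
  omega

/-- `movsxd rdx, ebp ; lea r15, [r14 + rdx * 2]` (0x104919, 0x10491c, C line 1310 `&rev[i]`): the address of `rev[i]` as a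
number, for an index below `2 ^ 31` and a table that does not wrap. -/
theorem slot_addr (R : Word) (i : Nat) (hi : i < 2 ^ 31) (hR : R.toNat + 2 * i < 2 ^ 64) :
    R + Word.ofBV (BitVec.signExtend 64 (BitVec.ofNat 32 i)) * 2 = addr (R.toNat + 2 * i) := by
  apply eq_addr
  have e2 : (2 : Word).toNat = 2 := rfl
  have es : (Word.ofBV (BitVec.signExtend 64 (BitVec.ofNat 32 i))).toNat = i := by
    rw [Spec.toNat_sext32 _ (by rw [BitVec.toNat_ofNat]; omega), BitVec.toNat_ofNat]
    omega
  rw [UInt64.toNat_add, UInt64.toNat_mul, es, e2]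
  omega

/-- `mov ecx, 0x23 ; sub ecx, r13d ; shr eax, cl ; lea ebx, [rax * 4] ; mov [r15], bx` (0x10490f – 0x10492f, C line 1310): the
16-bit value stored is `(x >> (35 - k)) << 2` for the 32-bit `x = bit_reverse(i)`: the count `35 - k` is in `22 .. 29`, so neither
the hardware's mask of the count, nor the 32-bit `lea`, nor the 16-bit store truncates anything. -/
theorem stored_value (x : Word) (k : Nat) (h6 : 6 ≤ k) (h13 : k ≤ 13) :
    (BitVec.setWidth 16 (BitVec.setWidth 32
      (Word.ofBV (Word.part .w32 x >>> ((BitVec.setWidth 8 (35#32 - BitVec.ofNat 32 k)).toNat % 32)) * 4).toBitVec)).toNat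
      = ((x.toNat % 2 ^ 32) >>> (35 - k)) <<< 2 := by
  have ec : (35#32 - BitVec.ofNat 32 k).toNat = 35 - k := Spec.toNat_sub32 35 k (by omega) (by decide)
  have ecnt : (BitVec.setWidth 8 (35#32 - BitVec.ofNat 32 k)).toNat % 32 = 35 - k := by
    rw [BitVec.toNat_setWidth, ec]
    omega
  have e4 : (4 : Word).toNat = 4 := rfl
  have hx : x.toNat % 2 ^ 32 < 2 ^ 32 := Nat.mod_lt _ (by decide)
  have hval := Mdct.rev_value (Mdct.ld_pow k h6 h13) (x.toNat % 2 ^ 32) hx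
  have hsmall : (x.toNat % 2 ^ 32) >>> (35 - k) < 2 ^ 14 := by
    have h1 := hval.2.1
    rw [Nat.shiftLeft_eq] at h1
    omega
  rw [ecnt, BitVec.toNat_setWidth, BitVec.toNat_setWidth, UInt64.toNat_toBitVec, UInt64.toNat_mul, Vorbis.toNat_ofBV32,
    BitVec.toNat_ushiftRight, Asan.part32_toNat, e4, Nat.shiftLeft_eq]
  omega

/-- The loop invariant of `compute_bitreverse` is about the entries below `i` only: it survives every memory change that leaves
them alone (the return addresses of the two calls of the body, pushed below the frame). -/
theorem revUpTo_eqOn {mem mem' : Mem} {R n i : Nat} (h : Mdct.RevUpTo mem R n i)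
    (he : Mem.EqOn R (R + 2 * i) mem mem') (hR : R + 2 * i ≤ 2 ^ 64) : Mdct.RevUpTo mem' R n i := by
  intro j hj
  rw [he.u16 (R + 2 * j) (by omega) (by omega) hR]
  exact h j hj

end Vorbis.Spec.compute_bitreverse
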